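-- pv_equiv track=rewrite | github.com/ReligionBots/QuranicBot | Cogs/q.py | arabicNumber
-- ===== SOURCE A (Python) =====
-- def arabicNumber(string):
--     number = {
--         '0': '٠',
--         '1': '١',
--         '2': '۲',
--         '3': '۳',
--         '4': '٤',
--         '5': '٥',
--         '6': '٦',
--         '7': '٧',
--         '8': '۸',
--         '9': '۹',
--     }
--     for i, j in number.items():
--         string = string.replace(i, j)
--     return string
-- ===== SOURCE B (Python) =====
-- def arabicNumber(string):
--     glyphs = '\u0660\u0661\u06F2\u06F3\u0664\u0665\u0666\u0667\u06F8\u06F9'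
--     out = []
--     for c in string:
--         out.append(glyphs[ord(c) - 48] if '0' <= c <= '9' else c)
--     return ''.join(out)
-- ===== Notes on version B (the rewrite author's own statement) =====
-- stated objective: alternative
-- what changed: B drops the mapping dict entirely: one explicit loop over the characters that, for each ASCII digit, indexes a glyph string arithmetically by ord(c)-48 and appends to an accumulator, instead of A's ten full-string replace scans driven by dict items.
import Mathlib
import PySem

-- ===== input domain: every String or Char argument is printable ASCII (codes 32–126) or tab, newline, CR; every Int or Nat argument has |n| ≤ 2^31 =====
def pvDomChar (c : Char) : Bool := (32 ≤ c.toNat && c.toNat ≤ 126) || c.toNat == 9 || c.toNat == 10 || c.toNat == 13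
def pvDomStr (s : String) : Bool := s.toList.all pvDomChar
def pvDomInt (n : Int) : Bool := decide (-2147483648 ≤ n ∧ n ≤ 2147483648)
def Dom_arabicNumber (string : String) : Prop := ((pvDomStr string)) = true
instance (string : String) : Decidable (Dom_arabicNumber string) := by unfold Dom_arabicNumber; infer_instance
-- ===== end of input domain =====

-- B replaces A's ten dict-driven full-string .replace scans with a single explicit loop
-- that maps each ASCII digit arithmetically (ord(c)-48) into a glyph table (objective: alternative).

-- ===== PORT A =====
-- the dict literal 'number' of A, as an insertion-order association list
def pvNumberItems : List (String × String) :=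
  [("0", "٠"), ("1", "١"), ("2", "۲"), ("3", "۳"), ("4", "٤"),
   ("5", "٥"), ("6", "٦"), ("7", "٧"), ("8", "۸"), ("9", "۹")]

def arabicNumber (string : String) : String :=
  -- for i, j in number.items(): string = string.replace(i, j)
  (PySem.Dict.mk pvNumberItems).items.foldl
    (fun s p => PySem.Str.replace s p.1 p.2) string

-- ===== PORT B =====
-- glyphs = '٠١۲۳٤٥٦٧۸۹'
def pvGlyphs : List Char := ['٠', '١', '۲', '۳', '٤', '٥', '٦', '٧', '۸', '۹']

-- the loop body: for c in string: out.append(glyphs[ord(c)-48] if '0' <= c <= '9' else c)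
-- (the indexing glyphs[ord(c)-48] is exact via getD: the guard puts ord(c)-48 in [0,9], in range)
def pvBLoop : List Char → List Char
  | [] => []
  | c :: t =>
      (if '0' ≤ c ∧ c ≤ '9' then pvGlyphs.getD (c.toNat - 48) c else c) :: pvBLoop t

def arabicNumber_alt (string : String) : String :=
  -- return ''.join(out)
  String.ofList (pvBLoop string.toList)

-- ===== PRECONDITION & SPEC =====
def Spec_arabicNumber (string : String) (out : String) : Prop := out = arabicNumber_alt string
instance (string : String) (out : String) : Decidable (Spec_arabicNumber string out) := by unfold Spec_arabicNumber; infer_instance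

-- ===== CLAIM (what is proved, stated in full; the proofs are below) =====
def Claim_equal_arabicNumber : Prop := ∀ (string : String), Dom_arabicNumber string → Spec_arabicNumber string (arabicNumber string)

-- ===== LEMMAS AND PROOFS =====

-- B's per-character substitution, as a function (the loop body's expression)
def pvSub (c : Char) : Char :=
  if '0' ≤ c ∧ c ≤ '9' then pvGlyphs.getD (c.toNat - 48) c else c

-- replace.go with a single-character needle is a flatMap over the characters
theorem pv_go_single (c : Char) (new : List Char) :
    ∀ (l : List Char) (fuel : Nat) (acc : List Char), l.length ≤ fuel →
      PySem.Chars.replace.go [c] new fuel l acc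
        = acc.reverse ++ l.flatMap (fun x => if x = c then new else [x]) := by
  intro l
  induction l with
  | nil =>
      intro fuel acc _
      cases fuel <;> simp [PySem.Chars.replace.go]
  | cons x t ih =>
      intro fuel acc hf
      cases fuel with
      | zero => simp at hf
      | succ n =>
          by_cases hx : x = c
          · subst hx
            have hp : List.isPrefixOf [x] (x :: t) = true := by
              simp [List.isPrefixOf]
            rw [PySem.Chars.replace.go]
            simp only [hp, if_true, List.length_cons] at *
            simp only [List.length_nil, Nat.zero_add, List.drop_succ_cons, List.drop_zero]
            rw [ih n (new.reverse ++ acc) (by omega)]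
            simp
          · have hpre : List.isPrefixOf [c] (x :: t) = false := by
              simp [List.isPrefixOf]; intro h; exact absurd h.symm hx
            rw [PySem.Chars.replace.go]
            simp only [hpre, Bool.false_eq_true, if_false]
            rw [ih n (x :: acc) (by simpa using Nat.le_of_succ_le_succ hf)]
            simp [hx]

-- replace with a single-character needle, on char lists
theorem pv_replace_single (c : Char) (new s : List Char) :
    PySem.Chars.replace s [c] new
      = s.flatMap (fun x => if x = c then new else [x]) := by
  unfold PySem.Chars.replace
  simp only [List.isEmpty_cons, Bool.false_eq_true, if_false]
  simpa using pv_go_single c new s s.length [] (le_refl _)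

-- a char different from the ten digit characters has a code outside [48,57]
theorem pv_nondigit_code (x : Char)
    (h0 : x ≠ '0') (h1 : x ≠ '1') (h2 : x ≠ '2') (h3 : x ≠ '3') (h4 : x ≠ '4')
    (h5 : x ≠ '5') (h6 : x ≠ '6') (h7 : x ≠ '7') (h8 : x ≠ '8') (h9 : x ≠ '9') :
    ¬ (48 ≤ x.toNat ∧ x.toNat ≤ 57) := by
  have k : ∀ d : Char, x ≠ d → x.toNat ≠ d.toNat := by
    intro d hne he
    exact hne (Char.ext (by exact UInt32.toNat_inj.mp he))
  have n0 := k '0' h0; have n1 := k '1' h1; have n2 := k '2' h2; have n3 := k '3' h3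
  have n4 := k '4' h4; have n5 := k '5' h5; have n6 := k '6' h6; have n7 := k '7' h7
  have n8 := k '8' h8; have n9 := k '9' h9
  rw [show ('0' : Char).toNat = 48 from rfl] at n0
  rw [show ('1' : Char).toNat = 49 from rfl] at n1
  rw [show ('2' : Char).toNat = 50 from rfl] at n2
  rw [show ('3' : Char).toNat = 51 from rfl] at n3
  rw [show ('4' : Char).toNat = 52 from rfl] at n4
  rw [show ('5' : Char).toNat = 53 from rfl] at n5
  rw [show ('6' : Char).toNat = 54 from rfl] at n6
  rw [show ('7' : Char).toNat = 55 from rfl] at n7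
  rw [show ('8' : Char).toNat = 56 from rfl] at n8
  rw [show ('9' : Char).toNat = 57 from rfl] at n9
  omega

-- per-character agreement of the ten chained substitutions with B's arithmetic map
theorem pv_char_eq (x : Char) :
    (List.flatMap (fun b => if b = '9' then "۹".toList else [b])
      (List.flatMap (fun b => if b = '8' then "۸".toList else [b])
        (List.flatMap (fun b => if b = '7' then "٧".toList else [b])
          (List.flatMap (fun b => if b = '6' then "٦".toList else [b])
            (List.flatMap (fun b => if b = '5' then "٥".toList else [b])
              (List.flatMap (fun b => if b = '4' then "٤".toList else [b])
                (List.flatMap (fun b => if b = '3' then "۳".toList else [b])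
                  (List.flatMap (fun b => if b = '2' then "۲".toList else [b])
                    (List.flatMap (fun b => if b = '1' then "١".toList else [b])
                      (if x = '0' then "٠".toList else [x]))))))))))
    = [pvSub x] := by
  by_cases h0 : x = '0'; · subst h0; decide
  by_cases h1 : x = '1'; · subst h1; decide
  by_cases h2 : x = '2'; · subst h2; decide
  by_cases h3 : x = '3'; · subst h3; decide
  by_cases h4 : x = '4'; · subst h4; decide
  by_cases h5 : x = '5'; · subst h5; decide
  by_cases h6 : x = '6'; · subst h6; decide
  by_cases h7 : x = '7'; · subst h7; decide
  by_cases h8 : x = '8'; · subst h8; decide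
  by_cases h9 : x = '9'; · subst h9; decide
  have hcode := pv_nondigit_code x h0 h1 h2 h3 h4 h5 h6 h7 h8 h9
  have hsub : pvSub x = x := by
    unfold pvSub
    rw [if_neg]
    intro ⟨hl, hr⟩
    exact hcode ⟨by exact_mod_cast hl, by exact_mod_cast hr⟩
  simp [h0, h1, h2, h3, h4, h5, h6, h7, h8, h9, hsub]

-- the ten chained substitutions over a whole list agree with the per-character map
theorem pv_chain_list (cs : List Char) :
    (List.flatMap (fun b => if b = '9' then "۹".toList else [b])
      (List.flatMap (fun b => if b = '8' then "۸".toList else [b])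
        (List.flatMap (fun b => if b = '7' then "٧".toList else [b])
          (List.flatMap (fun b => if b = '6' then "٦".toList else [b])
            (List.flatMap (fun b => if b = '5' then "٥".toList else [b])
              (List.flatMap (fun b => if b = '4' then "٤".toList else [b])
                (List.flatMap (fun b => if b = '3' then "۳".toList else [b])
                  (List.flatMap (fun b => if b = '2' then "۲".toList else [b])
                    (List.flatMap (fun b => if b = '1' then "١".toList else [b])
                      (List.flatMap (fun b => if b = '0' then "٠".toList else [b])
                        cs))))))))))
    = cs.map pvSub := by
  induction cs with
  | nil => simp
  | cons x t ih =>
      simp only [List.flatMap_cons, List.flatMap_append]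
      rw [ih, pv_char_eq x]
      rfl

-- A's ten replaces, on the character list
theorem pv_A_toList (s : String) :
    (arabicNumber s).toList
      = (List.flatMap (fun b => if b = '9' then "۹".toList else [b])
          (List.flatMap (fun b => if b = '8' then "۸".toList else [b])
            (List.flatMap (fun b => if b = '7' then "٧".toList else [b])
              (List.flatMap (fun b => if b = '6' then "٦".toList else [b])
                (List.flatMap (fun b => if b = '5' then "٥".toList else [b])
                  (List.flatMap (fun b => if b = '4' then "٤".toList else [b])
                    (List.flatMap (fun b => if b = '3' then "۳".toList else [b])
                      (List.flatMap (fun b => if b = '2' then "۲".toList else [b])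
                        (List.flatMap (fun b => if b = '1' then "١".toList else [b])
                          (List.flatMap (fun b => if b = '0' then "٠".toList else [b])
                            s.toList)))))))))) := by
  unfold arabicNumber pvNumberItems
  simp only [List.foldl]
  simp only [PySem.Str.toList_replace]
  rw [show ("0" : String).toList = ['0'] from rfl, show ("1" : String).toList = ['1'] from rfl,
      show ("2" : String).toList = ['2'] from rfl, show ("3" : String).toList = ['3'] from rfl,
      show ("4" : String).toList = ['4'] from rfl, show ("5" : String).toList = ['5'] from rfl,
      show ("6" : String).toList = ['6'] from rfl, show ("7" : String).toList = ['7'] from rfl,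
      show ("8" : String).toList = ['8'] from rfl, show ("9" : String).toList = ['9'] from rfl]
  simp only [pv_replace_single]

-- B's loop is the map of its body
theorem pv_B_toList (s : String) :
    (arabicNumber_alt s).toList = s.toList.map pvSub := by
  unfold arabicNumber_alt
  rw [String.toList_ofList]
  induction s.toList with
  | nil => rfl
  | cons x t ih => simp only [pvBLoop, pvSub, List.map_cons, ih]

-- ===== VERDICT (by name: the statement is the Claim_ definition above) =====
theorem arabicNumber_spec : Claim_equal_arabicNumber := by
  intro s _
  unfold Spec_arabicNumber
  have h : (arabicNumber s).toList = (arabicNumber_alt s).toList := by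
    rw [pv_A_toList, pv_B_toList, pv_chain_list]
  calc arabicNumber s = String.ofList (arabicNumber s).toList := by
        rw [String.ofList_toList]
    _ = String.ofList (arabicNumber_alt s).toList := by rw [h]
    _ = arabicNumber_alt s := by rw [String.ofList_toList]
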